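-- pv_equiv track=rewrite | github.com/jjz17/Tennis-Match-Outcome-Prediction | src/functions.py | is_s1_set_winner
-- ===== SOURCE A (Python) =====
-- def is_s1_set_winner(last_game_pbp, num_games):
--     """
--     Determines whether player 1 won the first set.
--
--     Parameters:
--         last_game_pbp (str) The string which encodes the play-by-play information of the last game in the set.
--         num_games (int) The total number of games in the set.
--
--     Returns:
--         boolean : A boolean that signifies whether player 1 won the first set.
--     """
--     # If tiebreak decider
--     if num_games > 12:
--         p1_points = 0
--         p2_points = 0
--
--         switches = last_game_pbp.split('/')
--         p1_serves = switches[::2]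
--         p2_serves = switches[1::2]
--         for switch in p1_serves:
--             p1_points += switch.count('A')
--             p1_points += switch.count('S')
--             p2_points += switch.count('R')
--             p2_points += switch.count('D')
--         for switch in p2_serves:
--             p2_points += switch.count('A')
--             p2_points += switch.count('S')
--             p1_points += switch.count('R')
--             p1_points += switch.count('D')
--         return p1_points > p2_points
--     else:
--         s_points = 0
--         r_points = 0
--
--         s_points += last_game_pbp.count('A')
--         s_points += last_game_pbp.count('S')
--         r_points += last_game_pbp.count('R')
--         r_points += last_game_pbp.count('D')
--
--         # If p2 serves
--         if num_games % 2 == 0: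
--             return r_points > s_points
--         # If p1 serves
--         else:
--             return s_points > r_points
-- ===== SOURCE B (Python) =====
-- def is_s1_set_winner(last_game_pbp, num_games):
--     """Single pass over the play-by-play: a serving flag (toggled on '/' in a
--     tiebreak, fixed by serve parity otherwise) routes each point to the right
--     player; player 1 wins iff p1 > p2."""
--     tiebreak = num_games > 12
--     p1_serving = True if tiebreak else num_games % 2 == 1
--     p1 = p2 = 0
--     for ch in last_game_pbp:
--         if ch == '/':
--             if tiebreak:
--                 p1_serving = not p1_serving
--         elif ch == 'A' or ch == 'S':
--             if p1_serving:
--                 p1 += 1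
--             else:
--                 p2 += 1
--         elif ch == 'R' or ch == 'D':
--             if p1_serving:
--                 p2 += 1
--             else:
--                 p1 += 1
--     return p1 > p2
-- ===== Notes on version B (the rewrite author's own statement) =====
-- stated objective: simpler
-- what changed: Replaced A's split('/')/[::2]-[1::2] slicing and two per-chunk counting loops (and the separate whole-string .count calls in the non-tiebreak branch) by a single character-by-character scan that keeps a serving flag (toggled on '/' in a tiebreak, fixed by serve parity otherwise) and routes each point to the right player.
import Mathlib
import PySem

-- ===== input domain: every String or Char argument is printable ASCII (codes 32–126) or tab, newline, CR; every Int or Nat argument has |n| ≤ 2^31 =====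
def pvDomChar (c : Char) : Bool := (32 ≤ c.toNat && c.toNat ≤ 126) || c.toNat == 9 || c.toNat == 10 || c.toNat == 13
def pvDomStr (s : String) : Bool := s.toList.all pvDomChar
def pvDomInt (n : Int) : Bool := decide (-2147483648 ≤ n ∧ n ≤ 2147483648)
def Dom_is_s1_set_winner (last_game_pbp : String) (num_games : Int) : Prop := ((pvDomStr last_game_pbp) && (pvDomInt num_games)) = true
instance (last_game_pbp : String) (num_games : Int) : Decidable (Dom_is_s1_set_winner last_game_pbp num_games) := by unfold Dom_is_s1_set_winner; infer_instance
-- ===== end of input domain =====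

-- B replaces A's split/slice/two-loop tiebreak counting by a single left-to-right scan with a
-- serving flag that flips on '/'; objective: simpler (one pass, no intermediate lists).

-- ===== PORT A =====
def is_s1_set_winner (last_game_pbp : String) (num_games : Int) : Bool :=
  if num_games > 12 then
    -- switches = last_game_pbp.split('/')  (sep "/" is non-empty, so split? always returns)
    let switches : List String := (PySem.Str.split? last_game_pbp "/").getD []
    -- p1_serves = switches[::2]; p2_serves = switches[1::2]  (step 2 ≠ 0, so slice? always returns)
    let p1_serves : List String := (PySem.List.slice? switches none none 2).getD []
    let p2_serves : List String := (PySem.List.slice? switches (some 1) none 2).getD []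
    let st1 : Int × Int := p1_serves.foldl (fun pq sw =>
      (pq.1 + (PySem.Str.count sw "A" : Int) + (PySem.Str.count sw "S" : Int),
       pq.2 + (PySem.Str.count sw "R" : Int) + (PySem.Str.count sw "D" : Int))) (0, 0)
    let st2 : Int × Int := p2_serves.foldl (fun pq sw =>
      (pq.1 + (PySem.Str.count sw "R" : Int) + (PySem.Str.count sw "D" : Int),
       pq.2 + (PySem.Str.count sw "A" : Int) + (PySem.Str.count sw "S" : Int))) st1
    decide (st2.1 > st2.2)
  else
    let s_points : Int := (PySem.Str.count last_game_pbp "A" : Int) + (PySem.Str.count last_game_pbp "S" : Int)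
    let r_points : Int := (PySem.Str.count last_game_pbp "R" : Int) + (PySem.Str.count last_game_pbp "D" : Int)
    if PySem.Int.mod num_games 2 = 0 then decide (r_points > s_points) else decide (s_points > r_points)

-- ===== PORT B =====
-- one step of B's scan: route the character's point by the current serving flag
def pvAltStep (tiebreak : Bool) (st : Bool × Int × Int) (ch : Char) : Bool × Int × Int :=
  if ch = '/' then (if tiebreak then (!st.1, st.2.1, st.2.2) else st)
  else if ch = 'A' ∨ ch = 'S' then
    (if st.1 then (st.1, st.2.1 + 1, st.2.2) else (st.1, st.2.1, st.2.2 + 1))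
  else if ch = 'R' ∨ ch = 'D' then
    (if st.1 then (st.1, st.2.1, st.2.2 + 1) else (st.1, st.2.1 + 1, st.2.2))
  else st

def is_s1_set_winner_alt (last_game_pbp : String) (num_games : Int) : Bool :=
  let tiebreak : Bool := decide (num_games > 12)
  let p1_serving : Bool := if tiebreak then true else decide (PySem.Int.mod num_games 2 = 1)
  let st := last_game_pbp.toList.foldl (pvAltStep tiebreak) (p1_serving, 0, 0)
  decide (st.2.1 > st.2.2)

-- ===== PRECONDITION & SPEC =====
def Spec_is_s1_set_winner (last_game_pbp : String) (num_games : Int) (out : Bool) : Prop := out = is_s1_set_winner_alt last_game_pbp num_games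
instance (last_game_pbp : String) (num_games : Int) (out : Bool) : Decidable (Spec_is_s1_set_winner last_game_pbp num_games out) := by unfold Spec_is_s1_set_winner; infer_instance

-- ===== CLAIM (what is proved, stated in full; the proofs are below) =====
def Claim_equal_is_s1_set_winner : Prop := ∀ (last_game_pbp : String) (num_games : Int), Dom_is_s1_set_winner last_game_pbp num_games → Spec_is_s1_set_winner last_game_pbp num_games (is_s1_set_winner last_game_pbp num_games)

-- ===== LEMMAS AND PROOFS =====

-- reference split-on-'/' with a reversed partial-chunk accumulator
def pvSp : List Char → List Char → List (List Char)
  | [], cur => [cur.reverse]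
  | c :: rest, cur => if c = '/' then cur.reverse :: pvSp rest [] else pvSp rest (c :: cur)

-- every other element, starting with (true) / skipping (false) the head
def pvEO {α : Type} : Bool → List α → List α
  | _, [] => []
  | true, x :: xs => x :: pvEO false xs
  | false, _ :: xs => pvEO true xs

def pvAS (l : List Char) : Int := (l.count 'A' : Int) + (l.count 'S' : Int)
def pvRD (l : List Char) : Int := (l.count 'R' : Int) + (l.count 'D' : Int)
def pvChunk (b : Bool) (l : List Char) : Int × Int := if b then (pvAS l, pvRD l) else (pvRD l, pvAS l)

-- alternating-server score of a chunk list, first chunk served by player 1 iff b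
def pvScore : Bool → List (List Char) → Int × Int
  | _, [] => (0, 0)
  | b, c :: chs => pvChunk b c + pvScore (!b) chs

theorem pvCountGo (a : Char) : ∀ (l : List Char) (fuel acc : Nat), l.length ≤ fuel →
    PySem.Chars.count.go [a] fuel l acc = acc + l.count a := by
  intro l
  induction l with
  | nil => intro fuel acc _; cases fuel <;> simp [PySem.Chars.count.go]
  | cons c t ih =>
    intro fuel acc h
    cases fuel with
    | zero => simp at h
    | succ f =>
      have hf : t.length ≤ f := by simpa using h
      by_cases hc : a = c
      · subst hc
        rw [show PySem.Chars.count.go [a] (f+1) (a :: t) acc = PySem.Chars.count.go [a] f t (acc+1) from by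
          simp [PySem.Chars.count.go, List.isPrefixOf]]
        rw [ih f (acc+1) hf, List.count_cons]
        simp; omega
      · rw [show PySem.Chars.count.go [a] (f+1) (c :: t) acc = PySem.Chars.count.go [a] f t acc from by
          simp [PySem.Chars.count.go, List.isPrefixOf, hc]]
        rw [ih f acc hf, List.count_cons]
        simp [Ne.symm hc]

theorem pvCount (a : Char) (l : List Char) : PySem.Chars.count l [a] = l.count a := by
  simpa using pvCountGo a l l.length 0 le_rfl

theorem pvSplitGo : ∀ (l : List Char) (fuel : Nat) (cur : List Char) (acc : List (List Char)), l.length < fuel →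
    PySem.Chars.splitOn.go ['/'] fuel l cur acc = acc.reverse ++ pvSp l cur := by
  intro l
  induction l with
  | nil =>
    intro fuel cur acc h
    cases fuel with
    | zero => omega
    | succ f => simp [PySem.Chars.splitOn.go, pvSp]
  | cons c rest ih =>
    intro fuel cur acc h
    cases fuel with
    | zero => omega
    | succ f =>
      have hf : rest.length < f := by simp at h; omega
      by_cases hc : c = '/'
      · subst hc
        rw [show PySem.Chars.splitOn.go ['/'] (f+1) ('/' :: rest) cur acc
              = PySem.Chars.splitOn.go ['/'] f rest [] (cur.reverse :: acc) from by
            simp [PySem.Chars.splitOn.go, List.isPrefixOf]]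
        rw [ih f [] (cur.reverse :: acc) hf]
        simp [pvSp]
      · rw [show PySem.Chars.splitOn.go ['/'] (f+1) (c :: rest) cur acc
              = PySem.Chars.splitOn.go ['/'] f rest (c :: cur) acc from by
            simp [PySem.Chars.splitOn.go, List.isPrefixOf, Ne.symm hc]]
        rw [ih f (c :: cur) acc hf]
        simp [pvSp, hc]

theorem pvSplitOn (l : List Char) : PySem.Chars.splitOn l ['/'] = pvSp l [] := by
  simpa [PySem.Chars.splitOn] using pvSplitGo l (l.length + 1) [] [] (by omega)

theorem pvE {α : Type} : ∀ (l : List α),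
    (List.range ((l.length + 1) / 2)).filterMap (fun k => l[2 * k]?) = pvEO true l
  | [] => by simp [pvEO]
  | [x] => by simp [pvEO, List.range_succ]
  | x :: y :: xs => by
    have ih := pvE xs
    have hlen : ((x :: y :: xs).length + 1) / 2 = (xs.length + 1) / 2 + 1 := by simp; omega
    rw [hlen, List.range_succ_eq_map, List.filterMap_cons, List.filterMap_map]
    have h0 : (x :: y :: xs)[2 * 0]? = some x := by simp
    rw [h0]
    have hcong : ∀ k : Nat, ((fun k => (x :: y :: xs)[2 * k]?) ∘ Nat.succ) k = xs[2 * k]? := by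
      intro k
      have : 2 * (k + 1) = 2 * k + 1 + 1 := by ring
      simp [Function.comp, Nat.succ_eq_add_one, this]
    rw [List.filterMap_congr (fun k _ => hcong k), ih]
    simp [pvEO]

theorem pvSliceEven {α : Type} (l : List α) : PySem.List.slice? l none none 2 = some (pvEO true l) := by
  simp only [PySem.List.slice?, PySem.List.sliceIndices]
  norm_num
  have hc : (if 0 < l.length then (((l.length : Int) + 2 - 1) / 2).toNat else 0) = (l.length + 1) / 2 := by
    split <;> omega
  rw [hc, List.filterMap_congr (fun k _ => by
    show l[(2 * (k:Int)).toNat]? = l[2 * k]?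
    have h2 : ((2 * (k : Int)).toNat) = 2 * k := by omega
    rw [h2] : ∀ k ∈ List.range ((l.length+1)/2), (fun x => l[(2 * (x:Int)).toNat]?) k = l[2*k]?)]
  exact pvE l

theorem pvSliceOdd {α : Type} (l : List α) : PySem.List.slice? l (some 1) none 2 = some (pvEO false l) := by
  simp only [PySem.List.slice?, PySem.List.sliceIndices]
  norm_num
  cases l with
  | nil => simp [pvEO]
  | cons x xs =>
    have hc : (if 1 < (x :: xs).length then ((((x :: xs).length : Int) - min 1 ((x :: xs).length : Int) + 2 - 1) / 2).toNat else 0)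
        = (xs.length + 1) / 2 := by
      simp; split <;> omega
    rw [hc, List.filterMap_congr (fun k _ => by
      show (x :: xs)[(min 1 (((x :: xs).length : Int)) + 2 * (k:Int)).toNat]? = xs[2 * k]?
      have h2 : ((min 1 (((x :: xs).length : Int)) + 2 * (k : Int)).toNat) = 2 * k + 1 := by simp; omega
      rw [h2]
      show (x :: xs)[2 * k + 1]? = xs[2 * k]?
      simp : ∀ k ∈ List.range ((xs.length+1)/2), (fun j => (x :: xs)[(min 1 (((x :: xs).length : Int)) + 2 * (j:Int)).toNat]?) k = xs[2*k]?)]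
    rw [pvE xs]
    rfl

theorem pvChunk_append (b : Bool) (u v : List Char) : pvChunk b (u ++ v) = pvChunk b u + pvChunk b v := by
  cases b <;> simp [pvChunk, pvAS, pvRD, List.count_append, Prod.ext_iff] <;> constructor <;> ring

theorem pvScore_acc (b : Bool) : ∀ (l cur : List Char) (c : Char),
    pvScore b (pvSp l (c :: cur)) = pvChunk b [c] + pvScore b (pvSp l cur) := by
  intro l
  induction l with
  | nil =>
    intro cur c
    simp only [pvSp, pvScore, List.reverse_cons, pvChunk_append]
    abel
  | cons a rest ih =>
    intro cur c
    by_cases ha : a = '/'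
    · subst ha
      simp [pvSp, pvScore, List.reverse_cons, pvChunk_append]
      abel
    · simp only [pvSp, ha, reduceIte]
      rw [ih (c :: cur) a, ih cur a, ih cur c]
      abel

theorem pvStep_delta (tb b : Bool) (p q : Int) (c : Char) (h : c ≠ '/') :
    pvAltStep tb (b, p, q) c = (b, p + (pvChunk b [c]).1, q + (pvChunk b [c]).2) := by
  by_cases hA : c = 'A' <;> by_cases hS : c = 'S' <;> by_cases hR : c = 'R' <;> by_cases hD : c = 'D' <;>
    cases b <;>
    simp_all [pvAltStep, pvChunk, pvAS, pvRD, List.count_nil]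

theorem pvFold_tb : ∀ (l : List Char) (b : Bool) (p q : Int),
    (l.foldl (pvAltStep true) (b, p, q)).2 =
      (p + (pvScore b (pvSp l [])).1, q + (pvScore b (pvSp l [])).2) := by
  intro l
  induction l with
  | nil => intro b p q; simp [pvSp, pvScore, pvChunk, pvAS, pvRD]
  | cons c rest ih =>
    intro b p q
    by_cases hc : c = '/'
    · subst hc
      rw [List.foldl_cons, show pvAltStep true (b, p, q) '/' = (!b, p, q) from by simp [pvAltStep]]
      rw [ih (!b) p q]
      simp [pvSp, pvScore, pvChunk, pvAS, pvRD]
    · rw [List.foldl_cons, pvStep_delta true b p q c hc,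
        ih b (p + (pvChunk b [c]).1) (q + (pvChunk b [c]).2)]
      have hsp : pvSp (c :: rest) [] = pvSp rest [c] := by simp [pvSp, hc]
      rw [hsp, pvScore_acc b rest [] c]
      simp [Prod.ext_iff, Prod.fst_add, Prod.snd_add]
      constructor <;> ring

theorem pvChunk_cons (b : Bool) (c : Char) (l : List Char) :
    pvChunk b (c :: l) = pvChunk b [c] + pvChunk b l := by
  simpa using pvChunk_append b [c] l

theorem pvFold_nt : ∀ (l : List Char) (b : Bool) (p q : Int),
    l.foldl (pvAltStep false) (b, p, q) = (b, p + (pvChunk b l).1, q + (pvChunk b l).2) := by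
  intro l
  induction l with
  | nil => intro b p q; simp [pvChunk, pvAS, pvRD]
  | cons c rest ih =>
    intro b p q
    by_cases hc : c = '/'
    · subst hc
      rw [List.foldl_cons, show pvAltStep false (b, p, q) '/' = (b, p, q) from by simp [pvAltStep]]
      rw [ih b p q, pvChunk_cons]
      have hz : pvChunk b ['/'] = (0, 0) := by cases b <;> simp [pvChunk, pvAS, pvRD]
      simp [hz]
    · rw [List.foldl_cons, pvStep_delta false b p q c hc,
        ih b (p + (pvChunk b [c]).1) (q + (pvChunk b [c]).2), pvChunk_cons b c rest]
      simp [Prod.ext_iff, Prod.fst_add, Prod.snd_add]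
      constructor <;> ring

theorem pvScore_eo : ∀ (chs : List (List Char)),
    pvScore true chs = (((pvEO true chs).map pvAS).sum + ((pvEO false chs).map pvRD).sum,
                        ((pvEO true chs).map pvRD).sum + ((pvEO false chs).map pvAS).sum)
  ∧ pvScore false chs = (((pvEO true chs).map pvRD).sum + ((pvEO false chs).map pvAS).sum,
                         ((pvEO true chs).map pvAS).sum + ((pvEO false chs).map pvRD).sum) := by
  intro chs
  induction chs with
  | nil => simp [pvScore, pvEO]
  | cons c chs ih =>
    obtain ⟨ih1, ih2⟩ := ih
    constructor
    · show pvChunk true c + pvScore (!true) chs = _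
      rw [show (!true) = false from rfl, ih2]
      cases hb : pvChunk true c
      simp_all [pvChunk, pvEO, Prod.ext_iff]
      constructor <;> ring
    · show pvChunk false c + pvScore (!false) chs = _
      rw [show (!false) = true from rfl, ih1]
      cases hb : pvChunk false c
      simp_all [pvChunk, pvEO, Prod.ext_iff]
      constructor <;> ring

theorem pvFoldPair {σ : Type} (f g h i : σ → Int) : ∀ (l : List σ) (p q : Int),
    l.foldl (fun pq sw => (pq.1 + f sw + g sw, pq.2 + h sw + i sw)) (p, q) =
      (p + (l.map f).sum + (l.map g).sum, q + (l.map h).sum + (l.map i).sum) := by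
  intro l
  induction l with
  | nil => intro p q; simp
  | cons x xs ih => intro p q; simp [ih]; constructor <;> ring

theorem pvEO_map {α β : Type} (f : α → β) : ∀ (b : Bool) (l : List α),
    pvEO b (l.map f) = (pvEO b l).map f := by
  intro b l
  induction l generalizing b with
  | nil => simp [pvEO]
  | cons x xs ih => cases b <;> simp [pvEO, ih]

theorem pvStrCount (s : String) (a : Char) (sub : String) (hsub : sub.toList = [a]) :
    PySem.Str.count s sub = s.toList.count a := by
  rw [PySem.Str.count_eq, hsub, pvCount]

theorem pvSumAS (L : List String) :
    ((L.map String.toList).map pvAS).sum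
      = (L.map (fun sw => (PySem.Str.count sw "A" : Int))).sum
        + (L.map (fun sw => (PySem.Str.count sw "S" : Int))).sum := by
  rw [List.map_map]
  rw [show (pvAS ∘ String.toList)
        = (fun sw => ((sw.toList.count 'A' : Int)) + ((sw.toList.count 'S' : Int))) from rfl]
  rw [PySem.List.sum_map_add_int]
  congr 1
  · exact congrArg List.sum (List.map_congr_left fun sw _ => by rw [pvStrCount sw 'A' "A" (by decide)])
  · exact congrArg List.sum (List.map_congr_left fun sw _ => by rw [pvStrCount sw 'S' "S" (by decide)])

theorem pvSumRD (L : List String) :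
    ((L.map String.toList).map pvRD).sum
      = (L.map (fun sw => (PySem.Str.count sw "R" : Int))).sum
        + (L.map (fun sw => (PySem.Str.count sw "D" : Int))).sum := by
  rw [List.map_map]
  rw [show (pvRD ∘ String.toList)
        = (fun sw => ((sw.toList.count 'R' : Int)) + ((sw.toList.count 'D' : Int))) from rfl]
  rw [PySem.List.sum_map_add_int]
  congr 1
  · exact congrArg List.sum (List.map_congr_left fun sw _ => by rw [pvStrCount sw 'R' "R" (by decide)])
  · exact congrArg List.sum (List.map_congr_left fun sw _ => by rw [pvStrCount sw 'D' "D" (by decide)])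

-- ===== VERDICT (by name: the statement is the Claim_ definition above) =====
theorem is_s1_set_winner_spec : Claim_equal_is_s1_set_winner := by
  intro s n _
  unfold Spec_is_s1_set_winner
  by_cases h12 : n > 12
  · -- tiebreak branch
    have hmap := PySem.Str.split?_map s "/"
    rw [show ("/" : String).toList = ['/'] from by decide] at hmap
    rw [show PySem.Chars.split? s.toList ['/'] = some (pvSp s.toList []) from by
      simp [PySem.Chars.split?, pvSplitOn]] at hmap
    obtain ⟨ss, hss, h2⟩ : ∃ ss, PySem.Str.split? s "/" = some ss
        ∧ ss.map String.toList = pvSp s.toList [] := by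
      cases h : PySem.Str.split? s "/" with
      | none => rw [h] at hmap; simp at hmap
      | some ss => rw [h] at hmap; simp at hmap; exact ⟨ss, rfl, hmap⟩
    simp only [is_s1_set_winner, is_s1_set_winner_alt, if_pos h12, hss, Option.getD_some,
      pvSliceEven, pvSliceOdd]
    rw [show decide (n > 12) = true from by simp [h12]]
    simp only [reduceIte]
    rw [pvFoldPair, pvFoldPair, pvFold_tb]
    rw [(pvScore_eo (pvSp s.toList [])).1, ← h2,
      pvEO_map String.toList true ss, pvEO_map String.toList false ss,
      pvSumAS (pvEO true ss), pvSumAS (pvEO false ss),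
      pvSumRD (pvEO true ss), pvSumRD (pvEO false ss)]
    rw [decide_eq_decide]
    omega
  · -- regular-game branch
    simp only [is_s1_set_winner, is_s1_set_winner_alt, if_neg h12]
    rw [show decide (n > 12) = false from by simp [h12]]
    simp only [Bool.false_eq_true, reduceIte]
    rw [pvFold_nt s.toList (decide (PySem.Int.mod n 2 = 1)) 0 0]
    rw [pvStrCount s 'A' "A" (by decide), pvStrCount s 'S' "S" (by decide),
      pvStrCount s 'R' "R" (by decide), pvStrCount s 'D' "D" (by decide)]
    by_cases hm : PySem.Int.mod n 2 = 0
    · rw [if_pos hm, show decide (PySem.Int.mod n 2 = 1) = false from by rw [hm]; rfl]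
      simp [pvChunk, pvAS, pvRD]
    · have hm1 : PySem.Int.mod n 2 = 1 := (PySem.Int.mod_two_eq n).resolve_left hm
      rw [if_neg hm, show decide (PySem.Int.mod n 2 = 1) = true from by rw [hm1]; rfl]
      simp [pvChunk, pvAS, pvRD]
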